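-- pv_equiv track=rewrite | github.com/mristovska/burrows-wheeler-fm | src/bw.py | create_tally
-- ===== SOURCE A (Python) =====
-- def create_tally(bwt):
--     """Given bwt string returns tally matrix"""
--     #should yet introduce checkpoints
--
--     #init
--     tally = {}
--     cnts = {}
--     for c in bwt:
--         if c not in cnts:
--             cnts[c] = 0
--             tally[c] = []
--
--     #insertion
--     for c in bwt:
--         cnts[c] += 1
--         for k in cnts:
--             tally[k].append(cnts[k])
--
--     return tally, cnts
-- ===== SOURCE B (Python) =====
-- def create_tally(bwt):
--     """Given bwt string returns tally matrix"""
--     # Different decomposition: one independent prefix-sum pass per distinct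
--     # character, instead of A's single interleaved pass that appends every
--     # character's running count at each position.
--     keys = list(dict.fromkeys(bwt))
--     tally = {}
--     cnts = {}
--     for k in keys:
--         col = []
--         run = 0
--         for c in bwt:
--             if c == k:
--                 run += 1
--             col.append(run)
--         tally[k] = col
--         cnts[k] = run
--     return tally, cnts
-- ===== Notes on version B (the rewrite author's own statement) =====
-- stated objective: alternative
-- what changed: Replaces A's single interleaved pass (which at every position appends each key's running count to its column) with per-character decomposition: the distinct characters are collected once in first-appearance order, then each character's cumulative column is computed by its own independent prefix-sum pass over bwt.
import Mathlib
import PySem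

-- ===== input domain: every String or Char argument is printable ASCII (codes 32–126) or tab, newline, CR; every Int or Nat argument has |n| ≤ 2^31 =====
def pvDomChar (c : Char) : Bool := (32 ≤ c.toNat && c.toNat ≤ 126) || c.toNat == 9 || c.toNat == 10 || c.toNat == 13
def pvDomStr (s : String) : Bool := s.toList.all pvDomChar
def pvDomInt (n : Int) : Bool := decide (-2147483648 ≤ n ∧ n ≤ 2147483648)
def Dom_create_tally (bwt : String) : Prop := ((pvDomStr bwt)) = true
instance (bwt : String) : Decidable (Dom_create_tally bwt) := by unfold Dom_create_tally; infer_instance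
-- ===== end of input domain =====

-- B replaces A's single interleaved pass with one independent prefix-sum column per
-- distinct character (different decomposition, same O(n*k) cost); return values equal.

-- ===== PORT A =====
-- first loop of A: seed cnts[c] = 0 and tally[c] = [] for unseen characters
def pyStepInit (st : PySem.Dict String (List Int) × PySem.Dict String Int) (c : Char) :
    PySem.Dict String (List Int) × PySem.Dict String Int :=
  if st.2.contains (String.singleton c) then st
  else (st.1.insert (String.singleton c) [], st.2.insert (String.singleton c) 0)

-- second loop of A: cnts[c] += 1 then for every key k append cnts[k] to tally[k]
def pyStepIns (st : PySem.Dict String (List Int) × PySem.Dict String Int) (c : Char) :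
    PySem.Dict String (List Int) × PySem.Dict String Int :=
  let cnts := st.2.modify (String.singleton c) 0 (· + 1)
  let tally := cnts.keys.foldl (fun t k => t.modify k [] (fun l => l ++ [cnts.getD k 0])) st.1
  (tally, cnts)

def create_tally (bwt : String) : (List (String × List Int)) × (List (String × Int)) :=
  let init := bwt.toList.foldl pyStepInit (PySem.Dict.empty, PySem.Dict.empty)
  let fin := bwt.toList.foldl pyStepIns init
  (fin.1.items, fin.2.items)

-- ===== PORT B =====
-- B's inner loop: one cumulative column for character k (col, run)
def pvColumn (cs : List Char) (k : Char) : List Int × Int :=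
  cs.foldl (fun p c =>
    let run := if c == k then p.2 + 1 else p.2
    (p.1 ++ [run], run)) ([], 0)

def create_tally_alt (bwt : String) : (List (String × List Int)) × (List (String × Int)) :=
  let cs := bwt.toList
  let keys := PySem.List.dedup cs
  (keys.map (fun k => (String.singleton k, (pvColumn cs k).1)),
   keys.map (fun k => (String.singleton k, (pvColumn cs k).2)))

-- ===== PRECONDITION & SPEC =====
def Spec_create_tally (bwt : String) (out : (List (String × List Int)) × (List (String × Int))) : Prop := out = create_tally_alt bwt
instance (bwt : String) (out : (List (String × List Int)) × (List (String × Int))) : Decidable (Spec_create_tally bwt out) := by unfold Spec_create_tally; infer_instance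

-- ===== CLAIM (what is proved, stated in full; the proofs are below) =====
def Claim_equal_create_tally : Prop := ∀ (bwt : String), Dom_create_tally bwt → Spec_create_tally bwt (create_tally bwt)

-- ===== LEMMAS AND PROOFS =====

lemma pvSingleton_inj {a b : Char} (h : String.singleton a = String.singleton b) : a = b := by
  have := congrArg String.toList h; simpa using this

lemma pvUpdate_self {A : Type} [BEq A] [LawfulBEq A] (s : PySem.Set A) (xs : List A)
    (h : ∀ x ∈ xs, x ∈ s) : PySem.Set.update s xs = s := by
  rw [PySem.Set.update_eq_append_filter]
  have hnil : (PySem.Set.ofList xs).filter (fun y => !s.contains y) = [] := by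
    rw [List.filter_eq_nil_iff]
    intro a ha
    have := h a ((PySem.Set.mem_ofList xs a).mp ha)
    simp [this]
  rw [hnil, List.append_nil]

lemma pvFilter_nodup_eq (L : List Char) (k : Char) (h : L.Nodup) (hk : k ∈ L) :
    L.filter (fun x => x == k) = [k] := by
  induction L with
  | nil => simp at hk
  | cons a t ih =>
    simp at h hk
    rcases hk with rfl | hk
    · simpa [List.filter_eq_nil_iff] using fun b hb => (by rintro rfl; exact h.1 hb : ¬ b = k)
    · have : ¬ a = k := by rintro rfl; exact h.1 hk
      simp [this, ih h.2 hk]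

lemma pvColumn_append (p : List Char) (c k : Char) :
    pvColumn (p ++ [c]) k =
      ((pvColumn p k).1 ++ [if c == k then (pvColumn p k).2 + 1 else (pvColumn p k).2],
       if c == k then (pvColumn p k).2 + 1 else (pvColumn p k).2) := by
  simp [pvColumn, List.foldl_append]

lemma pvColumn_snd (p : List Char) (k : Char) : (pvColumn p k).2 = (p.count k : Int) := by
  induction p using List.reverseRecOn with
  | nil => simp [pvColumn]
  | append_singleton q c ih =>
    rw [pvColumn_append]
    by_cases hc : c = k
    · simp [hc, ih, List.count_append]
    · simp [hc, ih, List.count_append]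

-- dedup commutes with mapping an injective function
lemma pvDedup_map (cs : List Char) :
    PySem.List.dedup (cs.map String.singleton) = (PySem.List.dedup cs).map String.singleton := by
  simp only [PySem.List.dedup_eq_ofList]
  induction cs using List.reverseRecOn with
  | nil => simp
  | append_singleton q c ih =>
    rw [List.map_append, List.map_singleton, PySem.Set.ofList_append_singleton,
        PySem.Set.ofList_append_singleton, ih, PySem.Set.add_eq_ite, PySem.Set.add_eq_ite]
    by_cases hm : c ∈ PySem.Set.ofList q
    · have : String.singleton c ∈ (PySem.Set.ofList q).map String.singleton :=
        List.mem_map_of_mem hm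
      simp [hm, this]
    · have : String.singleton c ∉ (PySem.Set.ofList q).map String.singleton := by
        intro hmem
        rcases List.mem_map.mp hmem with ⟨x, hx, hsx⟩
        exact hm ((pvSingleton_inj hsx) ▸ hx)
      simp [hm, this]

-- characterisation of A's first loop
lemma pvInitLoop (cs : List Char) (t : PySem.Dict String (List Int)) (c : PySem.Dict String Int)
    (hc : ∀ x, c.getD x 0 = 0) (ht : ∀ x, t.getD x [] = [])
    (hk : t.keys = c.keys) (hnd : c.keys.Nodup) :
    (∀ x, (cs.foldl pyStepInit (t, c)).2.getD x 0 = 0) ∧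
    (∀ x, (cs.foldl pyStepInit (t, c)).1.getD x [] = []) ∧
    (cs.foldl pyStepInit (t, c)).1.keys = (cs.foldl pyStepInit (t, c)).2.keys ∧
    (cs.foldl pyStepInit (t, c)).2.keys = PySem.Set.update c.keys (cs.map String.singleton) ∧
    (cs.foldl pyStepInit (t, c)).2.keys.Nodup := by
  induction cs generalizing t c with
  | nil => simpa [PySem.Set.update_nil] using ⟨hc, ht, hk, hnd⟩
  | cons c0 rest ih =>
    rw [List.foldl_cons, List.map_cons, PySem.Set.update_cons]
    by_cases hcon : c.contains (String.singleton c0) = true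
    · have hmem : String.singleton c0 ∈ c.keys := (PySem.Dict.contains_iff_mem_keys c _).mp hcon
      rw [show pyStepInit (t, c) c0 = (t, c) by simp [pyStepInit, hcon],
          PySem.Set.add_of_mem hmem]
      exact ih t c hc ht hk hnd
    · have hcon' : c.contains (String.singleton c0) = false := by
        simpa using hcon
      have hmem : String.singleton c0 ∉ c.keys := fun hm =>
        hcon ((PySem.Dict.contains_iff_mem_keys c _).mpr hm)
      have htcon : t.contains (String.singleton c0) = false := by
        rcases Bool.eq_false_or_eq_true (t.contains (String.singleton c0)) with h | h
        · exact absurd (hk ▸ (PySem.Dict.contains_iff_mem_keys t _).mp h) hmem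
        · exact h
      rw [show pyStepInit (t, c) c0
            = (t.insert (String.singleton c0) [], c.insert (String.singleton c0) 0) by
          simp [pyStepInit, hcon'], PySem.Set.add_of_not_mem hmem]
      have H := ih (t.insert (String.singleton c0) []) (c.insert (String.singleton c0) 0)
        (fun x => by rw [PySem.Dict.getD_insert]; split_ifs <;> simp [hc])
        (fun x => by rw [PySem.Dict.getD_insert]; split_ifs <;> simp [ht])
        (by rw [PySem.Dict.keys_insert_of_not_contains _ _ htcon,
              PySem.Dict.keys_insert_of_not_contains _ _ hcon', hk])
        (by rw [PySem.Dict.keys_insert_of_not_contains _ _ hcon']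
            have hdj : List.Disjoint c.keys [String.singleton c0] := by
              intro a ha hb
              rw [List.mem_singleton] at hb
              exact hmem (hb ▸ ha)
            exact List.Nodup.append hnd (List.nodup_singleton _) hdj)
      rwa [PySem.Dict.keys_insert_of_not_contains _ _ hcon'] at H

-- helper: value of cnts after one increment
lemma pvCntStep (c : PySem.Dict String Int) (L p : List Char) (c0 k : Char)
    (hc0 : c0 ∈ L) (hk : k ∈ L)
    (hcv : ∀ j ∈ L, c.getD (String.singleton j) 0 = (p.count j : Int)) :
    (c.modify (String.singleton c0) 0 (· + 1)).getD (String.singleton k) 0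
      = ((p ++ [c0]).count k : Int) := by
  rw [PySem.Dict.getD_modify, List.count_append]
  by_cases hkc : k = c0
  · subst hkc
    simp [hcv k hk]
  · have : String.singleton k ≠ String.singleton c0 := fun h => hkc (pvSingleton_inj h)
    have hne : ¬ (c0 == k) = true := by simpa using fun h => hkc h.symm
    simp [this, hcv k hk, List.count_singleton, hne]

-- characterisation of A's second loop
lemma pvInsLoop (cs L : List Char) (hnd : L.Nodup) (hsub : ∀ x ∈ cs, x ∈ L) (p : List Char)
    (t : PySem.Dict String (List Int)) (c : PySem.Dict String Int)
    (hck : c.keys = L.map String.singleton) (htk : t.keys = L.map String.singleton)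
    (hcv : ∀ k ∈ L, c.getD (String.singleton k) 0 = (p.count k : Int))
    (htv : ∀ k ∈ L, t.getD (String.singleton k) [] = (pvColumn p k).1) :
    (cs.foldl pyStepIns (t, c)).2.keys = L.map String.singleton ∧
    (cs.foldl pyStepIns (t, c)).1.keys = L.map String.singleton ∧
    (∀ k ∈ L, (cs.foldl pyStepIns (t, c)).2.getD (String.singleton k) 0
        = ((p ++ cs).count k : Int)) ∧
    (∀ k ∈ L, (cs.foldl pyStepIns (t, c)).1.getD (String.singleton k) []
        = (pvColumn (p ++ cs) k).1) := by
  induction cs generalizing p t c with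
  | nil => simpa using ⟨hck, htk, hcv, htv⟩
  | cons c0 rest ih =>
    have hc0 : c0 ∈ L := hsub c0 (by simp)
    set c' := c.modify (String.singleton c0) 0 (· + 1) with hc'
    have hck' : c'.keys = L.map String.singleton := by
      rw [hc', PySem.Dict.keys_modify, PySem.Dict.keys_insert_of_contains, hck]
      exact (PySem.Dict.contains_iff_mem_keys c _).mpr
        (hck ▸ List.mem_map_of_mem hc0)
    have hcv' : ∀ k ∈ L, c'.getD (String.singleton k) 0 = ((p ++ [c0]).count k : Int) :=
      fun k hk => pvCntStep c L p c0 k hc0 hk hcv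
    -- rewrite the inner append loop as a fold over the pair list
    have hfold :
        c'.keys.foldl (fun t k => t.modify k [] (fun l => l ++ [c'.getD k 0])) t
          = (L.map (fun k => (String.singleton k, c'.getD (String.singleton k) 0))).foldl
              (fun d q => d.modify q.1 [] (fun l => l ++ [q.2])) t := by
      rw [hck', List.foldl_map, List.foldl_map]
    have htk' :
        (c'.keys.foldl (fun t k => t.modify k [] (fun l => l ++ [c'.getD k 0])) t).keys
          = L.map String.singleton := by
      rw [hfold, PySem.Dict.keys_foldl_modify_key, htk, List.map_map]
      refine pvUpdate_self _ _ ?_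
      intro a ha
      rcases List.mem_map.mp ha with ⟨k, hkL, rfl⟩
      exact List.mem_map_of_mem hkL
    have htv' : ∀ k ∈ L,
        (c'.keys.foldl (fun t k => t.modify k [] (fun l => l ++ [c'.getD k 0])) t).getD
            (String.singleton k) [] = (pvColumn (p ++ [c0]) k).1 := by
      intro k hk
      rw [hfold, PySem.Dict.getD_foldl_modify_append, List.filter_map]
      have hpred : (L.filter ((fun q => q.1 == String.singleton k) ∘
            fun j => (String.singleton j, c'.getD (String.singleton j) 0))) = [k] := by
        rw [show ((fun (q : String × Int) => q.1 == String.singleton k) ∘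
              fun j => (String.singleton j, c'.getD (String.singleton j) 0))
            = fun j => j == k from funext fun j => by
              simp only [Function.comp_apply]
              rw [Bool.eq_iff_iff, beq_iff_eq, beq_iff_eq]
              exact ⟨fun h => pvSingleton_inj h, fun h => by rw [h]⟩]
        exact pvFilter_nodup_eq L k hnd hk
      rw [hpred, htv k hk, pvColumn_append]
      simp [pvCntStep c L p c0 k hc0 hk hcv, hc', pvColumn_snd, List.count_append]
      by_cases hkc : c0 = k
      · subst hkc; simp
      · have hkc2 : ¬ k = c0 := fun h => hkc h.symm
        simp [hkc]
    have := ih (fun x hx => hsub x (by simp [hx])) (p ++ [c0]) _ c' hck' htk' hcv' htv'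
    rw [List.foldl_cons]
    show ((rest.foldl pyStepIns (pyStepIns (t, c) c0)).2.keys = _) ∧ _
    simpa [pyStepIns, List.append_assoc] using this

-- ===== VERDICT (by name: the statement is the Claim_ definition above) =====
theorem create_tally_spec : Claim_equal_create_tally := by
  intro bwt _
  unfold Spec_create_tally create_tally create_tally_alt
  set cs := bwt.toList with hcs
  -- first loop
  obtain ⟨h1, h2, h3, h4, h5⟩ :=
    pvInitLoop cs PySem.Dict.empty PySem.Dict.empty
      (fun x => PySem.Dict.getD_empty x 0) (fun x => PySem.Dict.getD_empty x [])
      (by simp [PySem.Dict.keys_empty]) (by simp [PySem.Dict.keys_empty])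
  have hkeys : (cs.foldl pyStepInit (PySem.Dict.empty, PySem.Dict.empty)).2.keys
      = (PySem.List.dedup cs).map String.singleton := by
    rw [h4, PySem.Dict.keys_empty, PySem.Set.update_nil_left, ← PySem.List.dedup_eq_ofList,
        pvDedup_map]
  -- second loop
  obtain ⟨g1, g2, g3, g4⟩ :=
    pvInsLoop cs (PySem.List.dedup cs) (PySem.List.nodup_dedup cs)
      (fun x hx => (PySem.List.mem_dedup cs x).mpr hx) []
      (cs.foldl pyStepInit (PySem.Dict.empty, PySem.Dict.empty)).1
      (cs.foldl pyStepInit (PySem.Dict.empty, PySem.Dict.empty)).2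
      hkeys (h3.trans hkeys)
      (fun k _ => by simp [h1]) (fun k _ => by simp [h2, pvColumn])
  refine Prod.ext ?_ ?_
  · show (cs.foldl pyStepIns _).1.items = _
    rw [PySem.Dict.items_eq_map_keys _ (g2 ▸ (hkeys ▸ h5 : _)) [], g2, List.map_map]
    exact List.map_congr_left fun k hk => by
      simp [g4 k hk]
  · show (cs.foldl pyStepIns _).2.items = _
    rw [PySem.Dict.items_eq_map_keys _ (g1 ▸ (hkeys ▸ h5 : _)) 0, g1, List.map_map]
    exact List.map_congr_left fun k hk => by
      simp [g3 k hk, pvColumn_snd]
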